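-- pv_equiv track=rewrite | github.com/hari-hawk/Digital-Direction | dd-extraction/src/extraction/generic.py | _windstream_service_type
-- ===== SOURCE A (Python) =====
-- WINDSTREAM_CIRCUIT_TO_SERVICE = {
--     "customer provided access": "UCaaS",
--     "sd-wan management-concierge": "SDWAN",
--     "sd-wan management": "SDWAN",
--     "sd-wan service license": "SDWAN",
--     "cellular broadband internet access": "Wireless Cellular Internet",
--     "cellular broadband charge": "Wireless Cellular Internet",
--     "ethernet access": "Ethernet",
--     "internet service": "DIA",
--     "access loop": "UCaaS",
--     "voip": "UCaaS",
--     "broadband": "Broadband",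
--     "email": "Other",
--     "centrex": "Centrex",
--     "centrex link": "Centrex",
--     "ibn exchange": "Centrex",
--     "billed number": "Centrex",
-- }
--
-- def _windstream_service_type(circuit_types: set) -> str:
--     """Determine Windstream service type from circuit types at a site."""
--     types_lower = {ct.lower() for ct in circuit_types if ct}
--
--     # Priority order: SDWAN > UCaaS > SIP Trunk > Centrex > DIA > other
--     # Check for SDWAN first (highest priority)
--     for ct_lower in types_lower:
--         if "sd-wan" in ct_lower or "sdwan" in ct_lower:
--             return "SDWAN"
--
--     # Check for SIP Trunk
--     for ct_lower in types_lower: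
--         if "trunk" in ct_lower or "sip" in ct_lower:
--             return "SIP Trunk"
--
--     # Check for Centrex
--     for ct_lower in types_lower:
--         if "centrex" in ct_lower or "ibn" in ct_lower or "billed number" in ct_lower:
--             return "Centrex"
--
--     # Check for UCaaS (VoIP, access loop, customer provided access)
--     for ct_lower in types_lower:
--         if "voip" in ct_lower or "access loop" in ct_lower or "customer provided" in ct_lower:
--             return "UCaaS"
--
--     # Check for Internet/DIA
--     for ct_lower in types_lower:
--         if "internet" in ct_lower or "ethernet" in ct_lower:
--             return "DIA"
--
--     # Check for Broadband
--     for ct_lower in types_lower: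
--         if "broadband" in ct_lower:
--             return "Broadband"
--
--     # Check for cellular
--     for ct_lower in types_lower:
--         if "cellular" in ct_lower:
--             return "Wireless Cellular Internet"
--
--     # Fallback to carrier-specific map
--     for ct_lower in types_lower:
--         for pattern, stype in WINDSTREAM_CIRCUIT_TO_SERVICE.items():
--             if pattern in ct_lower:
--                 return stype
--
--     if types_lower:
--         return "UCaaS"  # default for Windstream
--     return "UCaaS"
-- ===== SOURCE B (Python) =====
-- _CATS = [
--     (("sd-wan", "sdwan"), "SDWAN"),
--     (("trunk", "sip"), "SIP Trunk"),
--     (("centrex", "ibn", "billed number"), "Centrex"),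
--     (("voip", "access loop", "customer provided"), "UCaaS"),
--     (("internet", "ethernet"), "DIA"),
--     (("broadband",), "Broadband"),
--     (("cellular",), "Wireless Cellular Internet"),
--     (("email",), "Other"),
-- ]
--
--
-- def _windstream_service_type(circuit_types: set) -> str:
--     """Determine Windstream service type from circuit types at a site."""
--     best = 8
--     for ct in circuit_types:
--         cl = ct.lower()
--         r = next((i for i, (keys, _) in enumerate(_CATS)
--                   if any(k in cl for k in keys)), 8)
--         if r < best:
--             best = r
--     return _CATS[best][1] if best < 8 else "UCaaS"
-- ===== Notes on version B (the rewrite author's own statement) =====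
-- stated objective: simpler
-- what changed: Replaces A's eight separate scans (seven keyword loops plus a 16-pattern fallback map walk, of which only the 'email' entry is still reachable) with a single pass that keeps the minimum priority rank per element over an 8-row priority table.
import Mathlib
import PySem

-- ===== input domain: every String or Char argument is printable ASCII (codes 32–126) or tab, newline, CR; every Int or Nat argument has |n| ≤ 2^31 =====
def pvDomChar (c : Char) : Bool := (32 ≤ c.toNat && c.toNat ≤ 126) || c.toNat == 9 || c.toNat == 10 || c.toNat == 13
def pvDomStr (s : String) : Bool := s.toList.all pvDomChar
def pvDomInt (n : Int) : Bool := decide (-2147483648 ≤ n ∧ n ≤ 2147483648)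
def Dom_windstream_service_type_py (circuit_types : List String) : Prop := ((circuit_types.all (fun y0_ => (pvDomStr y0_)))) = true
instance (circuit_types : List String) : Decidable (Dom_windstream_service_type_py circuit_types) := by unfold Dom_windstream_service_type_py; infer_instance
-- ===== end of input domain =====

-- B replaces A's eight successive scans (seven keyword loops + the fallback map walk, of which
-- only the 'email' entry is still reachable) with a single pass keeping the minimum priority rank
-- per element over an 8-row priority table; objective: simpler.


-- ===== PORT A =====
def WINDSTREAM_CIRCUIT_TO_SERVICE : List (String × String) :=
  [("customer provided access", "UCaaS"),
   ("sd-wan management-concierge", "SDWAN"),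
   ("sd-wan management", "SDWAN"),
   ("sd-wan service license", "SDWAN"),
   ("cellular broadband internet access", "Wireless Cellular Internet"),
   ("cellular broadband charge", "Wireless Cellular Internet"),
   ("ethernet access", "Ethernet"),
   ("internet service", "DIA"),
   ("access loop", "UCaaS"),
   ("voip", "UCaaS"),
   ("broadband", "Broadband"),
   ("email", "Other"),
   ("centrex", "Centrex"),
   ("centrex link", "Centrex"),
   ("ibn exchange", "Centrex"),
   ("billed number", "Centrex")]

def windstream_service_type_py (circuit_types : List String) : String :=
  let types_lower := PySem.Set.ofList ((circuit_types.filter (fun ct => ct ≠ "")).map PySem.Str.lower)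
  if types_lower.any (fun s => PySem.Str.isIn "sd-wan" s || PySem.Str.isIn "sdwan" s) then "SDWAN"
  else if types_lower.any (fun s => PySem.Str.isIn "trunk" s || PySem.Str.isIn "sip" s) then "SIP Trunk"
  else if types_lower.any (fun s => PySem.Str.isIn "centrex" s || PySem.Str.isIn "ibn" s || PySem.Str.isIn "billed number" s) then "Centrex"
  else if types_lower.any (fun s => PySem.Str.isIn "voip" s || PySem.Str.isIn "access loop" s || PySem.Str.isIn "customer provided" s) then "UCaaS"
  else if types_lower.any (fun s => PySem.Str.isIn "internet" s || PySem.Str.isIn "ethernet" s) then "DIA"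
  else if types_lower.any (fun s => PySem.Str.isIn "broadband" s) then "Broadband"
  else if types_lower.any (fun s => PySem.Str.isIn "cellular" s) then "Wireless Cellular Internet"
  else
    -- fallback loop: first matching map entry; the two final returns are both "UCaaS"
    (types_lower.findSome? (fun s =>
      (WINDSTREAM_CIRCUIT_TO_SERVICE.find? (fun p => PySem.Str.isIn p.1 s)).map Prod.snd)).getD "UCaaS"

-- ===== PORT B =====
def pvCATS : List (List String × String) :=
  [(["sd-wan", "sdwan"], "SDWAN"),
   (["trunk", "sip"], "SIP Trunk"),
   (["centrex", "ibn", "billed number"], "Centrex"),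
   (["voip", "access loop", "customer provided"], "UCaaS"),
   (["internet", "ethernet"], "DIA"),
   (["broadband"], "Broadband"),
   (["cellular"], "Wireless Cellular Internet"),
   (["email"], "Other")]

-- rank of one lowered element: index of the first matching category, 8 (= pvCATS.length) if none (= Source B's next(…, 8))
def pvRankOf (cl : String) : Nat :=
  pvCATS.findIdx (fun c => c.1.any (fun k => PySem.Str.isIn k cl))

def windstream_service_type_py_alt (circuit_types : List String) : String :=
  let best := circuit_types.foldl
    (fun b ct => if pvRankOf (PySem.Str.lower ct) < b then pvRankOf (PySem.Str.lower ct) else b) 8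
  if best < 8 then (pvCATS.getD best ([], "")).2 else "UCaaS"

-- ===== PRECONDITION & SPEC =====
def Spec_windstream_service_type_py (circuit_types : List String) (out : String) : Prop := out = windstream_service_type_py_alt circuit_types
instance (circuit_types : List String) (out : String) : Decidable (Spec_windstream_service_type_py circuit_types out) := by unfold Spec_windstream_service_type_py; infer_instance

-- ===== CLAIM (what is proved, stated in full; the proofs are below) =====
def Claim_equal_windstream_service_type_py : Prop := ∀ (circuit_types : List String), Dom_windstream_service_type_py circuit_types → Spec_windstream_service_type_py circuit_types (windstream_service_type_py circuit_types)

-- ===== LEMMAS AND PROOFS =====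

-- keyword predicate of priority row i (i < 8), applied to a lowered element
def pvP (i : Nat) (s : String) : Bool := (pvCATS.getD i ([], "")).1.any (fun k => PySem.Str.isIn k s)

-- the fold of port B, named for the proofs (definitionally the body of the port)
def pvFold (l : List String) (b : Nat) : Nat :=
  l.foldl (fun b ct => if pvRankOf (PySem.Str.lower ct) < b then pvRankOf (PySem.Str.lower ct) else b) b

theorem pvAlt_eq (l : List String) :
    windstream_service_type_py_alt l =
      if pvFold l 8 < 8 then (pvCATS.getD (pvFold l 8) ([], "")).2 else "UCaaS" := rfl

theorem pvFold_cons (ct : String) (l : List String) (b : Nat) :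
    pvFold (ct :: l) b =
      pvFold l (if pvRankOf (PySem.Str.lower ct) < b then pvRankOf (PySem.Str.lower ct) else b) := rfl

-- bridges: row i of the table spelled out (right-associated, as List.any produces)
theorem pvP0_eq (s : String) : pvP 0 s = (PySem.Str.isIn "sd-wan" s || PySem.Str.isIn "sdwan" s) := by
  simp [pvP, pvCATS]
theorem pvP1_eq (s : String) : pvP 1 s = (PySem.Str.isIn "trunk" s || PySem.Str.isIn "sip" s) := by
  simp [pvP, pvCATS]
theorem pvP2_eq (s : String) : pvP 2 s = (PySem.Str.isIn "centrex" s || (PySem.Str.isIn "ibn" s || PySem.Str.isIn "billed number" s)) := by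
  simp [pvP, pvCATS]
theorem pvP3_eq (s : String) : pvP 3 s = (PySem.Str.isIn "voip" s || (PySem.Str.isIn "access loop" s || PySem.Str.isIn "customer provided" s)) := by
  simp [pvP, pvCATS]
theorem pvP4_eq (s : String) : pvP 4 s = (PySem.Str.isIn "internet" s || PySem.Str.isIn "ethernet" s) := by
  simp [pvP, pvCATS]
theorem pvP5_eq (s : String) : pvP 5 s = PySem.Str.isIn "broadband" s := by
  simp [pvP, pvCATS]
theorem pvP6_eq (s : String) : pvP 6 s = PySem.Str.isIn "cellular" s := by
  simp [pvP, pvCATS]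
theorem pvP7_eq (s : String) : pvP 7 s = PySem.Str.isIn "email" s := by
  simp [pvP, pvCATS]

-- ---- rank facts ----
theorem pvP_rank (s : String) (h : pvRankOf s < 8) : pvP (pvRankOf s) s = true := by
  have h' : pvRankOf s < pvCATS.length := h
  show (pvCATS.getD (pvRankOf s) ([], "")).1.any (fun k => PySem.Str.isIn k s) = true
  rw [List.getD_eq_getElem?_getD, List.getElem?_eq_getElem h', Option.getD_some]
  exact List.findIdx_getElem (w := h')

theorem pvRank_le_of (s : String) (j : Nat) (hj : j < 8) (h : pvP j s = true) : pvRankOf s ≤ j := by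
  by_contra hgt
  have hlt : j < pvRankOf s := by omega
  have hj' : j < pvCATS.length := hj
  have hf := List.not_of_lt_findIdx (p := fun c => c.1.any (fun k => PySem.Str.isIn k s))
    (xs := pvCATS) hlt
  rw [pvP, List.getD_eq_getElem?_getD, List.getElem?_eq_getElem hj', Option.getD_some] at h
  rw [List.any_eq_true] at h
  obtain ⟨x, hx, hpx⟩ := h
  rw [PySem.Str.isIn_iff_infix] at hpx
  rw [List.any_eq_false] at hf
  have hfx := hf x hx
  rw [PySem.Str.isIn_iff_infix] at hfx
  exact hfx hpx

-- ---- fold facts ----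
theorem pvFold_le (l : List String) (b : Nat) : pvFold l b ≤ b := by
  induction l generalizing b with
  | nil => simp [pvFold]
  | cons ct l ih =>
    rw [pvFold_cons]
    split
    · exact le_trans (ih _) (by omega)
    · exact ih _

theorem pvFold_le_rank (l : List String) (b : Nat) (ct : String) (h : ct ∈ l) :
    pvFold l b ≤ pvRankOf (PySem.Str.lower ct) := by
  induction l generalizing b with
  | nil => simp at h
  | cons c l ih =>
    rw [pvFold_cons]
    rcases List.mem_cons.mp h with rfl | h'
    · split
      · exact pvFold_le _ _
      · exact le_trans (pvFold_le _ _) (by omega)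
    · exact ih _ h'

theorem pvFold_ge (l : List String) (b i : Nat) (hb : i ≤ b)
    (h : ∀ ct ∈ l, i ≤ pvRankOf (PySem.Str.lower ct)) : i ≤ pvFold l b := by
  induction l generalizing b with
  | nil => simpa [pvFold]
  | cons ct l ih =>
    rw [pvFold_cons]
    have h1 := h ct (by simp)
    refine ih _ ?_ (fun c hc => h c (by simp [hc]))
    split <;> omega

theorem pvFold_eq (l : List String) (i : Nat) (hi : i ≤ 8)
    (hlo : ∀ ct ∈ l, i ≤ pvRankOf (PySem.Str.lower ct))
    (hup : i = 8 ∨ ∃ ct ∈ l, pvRankOf (PySem.Str.lower ct) ≤ i) : pvFold l 8 = i := by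
  refine le_antisymm ?_ (pvFold_ge l 8 i hi hlo)
  rcases hup with rfl | ⟨ct, hct, hr⟩
  · exact pvFold_le _ _
  · exact le_trans (pvFold_le_rank l 8 ct hct) hr

-- ---- A-side: the set of lowered non-empty elements ----
theorem pvMem_setL (l : List String) (s : String) :
    s ∈ PySem.Set.ofList ((l.filter (fun ct => ct ≠ "")).map PySem.Str.lower) ↔
      ∃ ct ∈ l, ct ≠ "" ∧ s = PySem.Str.lower ct := by
  simp only [PySem.Set.mem_ofList, List.mem_map, List.mem_filter, decide_eq_true_eq]
  constructor
  · rintro ⟨ct, ⟨hct, hne⟩, rfl⟩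
    exact ⟨ct, hct, hne, rfl⟩
  · rintro ⟨ct, hct, hne, rfl⟩
    exact ⟨ct, ⟨hct, hne⟩, rfl⟩

theorem pvAny_setL (l : List String) (p : String → Bool) (hp : p "" = false) :
    (PySem.Set.ofList ((l.filter (fun ct => ct ≠ "")).map PySem.Str.lower)).any p =
      l.any (fun ct => p (PySem.Str.lower ct)) := by
  rw [Bool.eq_iff_iff]
  simp only [List.any_eq_true]
  constructor
  · rintro ⟨s, hs, hps⟩
    rcases (pvMem_setL l s).mp hs with ⟨ct, hct, _, rfl⟩
    exact ⟨ct, hct, hps⟩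
  · rintro ⟨ct, hct, hps⟩
    by_cases hne : ct = ""
    · subst hne
      rw [show PySem.Str.lower "" = "" from rfl, hp] at hps
      exact absurd hps (by simp)
    · exact ⟨PySem.Str.lower ct, (pvMem_setL l _).mpr ⟨ct, hct, hne, rfl⟩, hps⟩

-- ---- substring monotonicity ----
theorem pvIsIn_mono {a b s : String} (h : a.toList <:+: b.toList)
    (hb : PySem.Str.isIn b s = true) : PySem.Str.isIn a s = true := by
  rw [PySem.Str.isIn_iff_infix] at hb ⊢
  exact h.trans hb

theorem pvIsIn_false_of (a b s : String) (h : a.toList <:+: b.toList)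
    (ha : PySem.Str.isIn a s = false) : PySem.Str.isIn b s = false := by
  cases hb : PySem.Str.isIn b s
  · rfl
  · rw [pvIsIn_mono h hb] at ha
    exact ha

-- every map pattern except "email" contains a keyword of priority 0-6, so on an element on
-- which rows 0-6 all failed the fallback dict walk can only hit the "email" entry
theorem pvFind_map (s : String)
    (h0 : pvP 0 s = false) (h2 : pvP 2 s = false)
    (h3 : pvP 3 s = false) (h4 : pvP 4 s = false) (h5 : pvP 5 s = false)
    (h6 : pvP 6 s = false) :
    WINDSTREAM_CIRCUIT_TO_SERVICE.find? (fun p => PySem.Str.isIn p.1 s) =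
      if PySem.Str.isIn "email" s then some ("email", "Other") else none := by
  rw [pvP0_eq, Bool.or_eq_false_iff] at h0
  rw [pvP2_eq, Bool.or_eq_false_iff, Bool.or_eq_false_iff] at h2
  rw [pvP3_eq, Bool.or_eq_false_iff, Bool.or_eq_false_iff] at h3
  rw [pvP4_eq, Bool.or_eq_false_iff] at h4
  rw [pvP5_eq] at h5
  rw [pvP6_eq] at h6
  obtain ⟨hsd, -⟩ := h0
  obtain ⟨hcx, hibn, hbn⟩ := h2
  obtain ⟨hvoip, hal, hcp⟩ := h3
  obtain ⟨hint, heth⟩ := h4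
  have c1 := pvIsIn_false_of _ "customer provided access" s (by decide) hcp
  have c2 := pvIsIn_false_of _ "sd-wan management-concierge" s (by decide) hsd
  have c3 := pvIsIn_false_of _ "sd-wan management" s (by decide) hsd
  have c4 := pvIsIn_false_of _ "sd-wan service license" s (by decide) hsd
  have c5 := pvIsIn_false_of _ "cellular broadband internet access" s (by decide) h6
  have c6 := pvIsIn_false_of _ "cellular broadband charge" s (by decide) h6
  have c7 := pvIsIn_false_of _ "ethernet access" s (by decide) heth
  have c8 := pvIsIn_false_of _ "internet service" s (by decide) hint
  have c13 := pvIsIn_false_of _ "centrex link" s (by decide) hcx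
  have c14 := pvIsIn_false_of _ "ibn exchange" s (by decide) hibn
  cases he : PySem.Str.isIn "email" s <;>
    simp only [WINDSTREAM_CIRCUIT_TO_SERVICE, List.find?, c1, c2, c3, c4, c5, c6, c7, c8,
      c13, c14, hal, hvoip, h5, hcx, hbn, he, if_true, if_false, Bool.false_eq_true]

theorem pvFallback (L : List String)
    (h : ∀ s ∈ L, ∀ j, j ≤ 6 → pvP j s = false) :
    L.findSome? (fun s =>
        (WINDSTREAM_CIRCUIT_TO_SERVICE.find? (fun p => PySem.Str.isIn p.1 s)).map Prod.snd) =
      if L.any (fun s => PySem.Str.isIn "email" s) then some "Other" else none := by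
  induction L with
  | nil => rfl
  | cons s L ih =>
    have hs := h s (by simp)
    have ih' := ih (fun t ht j hj => h t (by simp [ht]) j hj)
    rw [List.findSome?_cons]
    rw [pvFind_map s (hs 0 (by omega)) (hs 2 (by omega)) (hs 3 (by omega))
      (hs 4 (by omega)) (hs 5 (by omega)) (hs 6 (by omega))]
    cases he : PySem.Str.isIn "email" s
    · rw [if_neg (by simp)]
      rw [ih']
      rw [List.any_cons, he, Bool.false_or]
      rfl
    · rw [if_pos (by simp)]
      rw [show (s :: L).any (fun s => PySem.Str.isIn "email" s) = true by
        rw [List.any_cons, he, Bool.true_or]]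
      rfl

-- ---- B-side characterisations used case by case ----
theorem pvRank_ge (l : List String) (i : Nat) (hi : i ≤ 8)
    (hb : ∀ j, j < i → l.any (fun ct => pvP j (PySem.Str.lower ct)) = false) :
    ∀ ct ∈ l, i ≤ pvRankOf (PySem.Str.lower ct) := by
  intro ct hct
  rcases Nat.lt_or_ge (pvRankOf (PySem.Str.lower ct)) i with hlt | hge
  · exfalso
    have h8 : pvRankOf (PySem.Str.lower ct) < 8 := lt_of_lt_of_le hlt hi
    have hp := pvP_rank _ h8
    have hfalse := hb _ hlt
    rw [List.any_eq_false] at hfalse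
    exact absurd hp (by simpa using hfalse ct hct)
  · exact hge

theorem pvAlt_case (l : List String) (i : Nat) (hi : i < 8)
    (hlow : ∀ j, j < i → l.any (fun ct => pvP j (PySem.Str.lower ct)) = false)
    (hhit : l.any (fun ct => pvP i (PySem.Str.lower ct)) = true) :
    windstream_service_type_py_alt l = (pvCATS.getD i ([], "")).2 := by
  rw [pvAlt_eq]
  obtain ⟨ct, hct, hp⟩ := List.any_eq_true.mp hhit
  have hfold : pvFold l 8 = i :=
    pvFold_eq l i (by omega) (pvRank_ge l i (by omega) hlow)
      (Or.inr ⟨ct, hct, pvRank_le_of _ i hi (by simpa using hp)⟩)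
  rw [hfold, if_pos hi]

theorem pvAlt_none (l : List String)
    (hlow : ∀ j, j < 8 → l.any (fun ct => pvP j (PySem.Str.lower ct)) = false) :
    windstream_service_type_py_alt l = "UCaaS" := by
  rw [pvAlt_eq]
  have hfold : pvFold l 8 = 8 :=
    pvFold_eq l 8 (le_refl _) (pvRank_ge l 8 (le_refl _) hlow) (Or.inl rfl)
  rw [hfold]
  simp

-- the if-chain of port A over abstract booleans equals port B (small goals for the kernel)
-- the if-chain of port A over abstract booleans equals port B (small goals for the kernel)
set_option maxHeartbeats 1600000 in
theorem pvChain_eq (l : List String) (c0 c1 c2 c3 c4 c5 c6 : Bool)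
    (e0 : c0 = l.any (fun ct => pvP 0 (PySem.Str.lower ct)))
    (e1 : c1 = l.any (fun ct => pvP 1 (PySem.Str.lower ct)))
    (e2 : c2 = l.any (fun ct => pvP 2 (PySem.Str.lower ct)))
    (e3 : c3 = l.any (fun ct => pvP 3 (PySem.Str.lower ct)))
    (e4 : c4 = l.any (fun ct => pvP 4 (PySem.Str.lower ct)))
    (e5 : c5 = l.any (fun ct => pvP 5 (PySem.Str.lower ct)))
    (e6 : c6 = l.any (fun ct => pvP 6 (PySem.Str.lower ct))) :
    (if c0 then "SDWAN"
     else if c1 then "SIP Trunk"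
     else if c2 then "Centrex"
     else if c3 then "UCaaS"
     else if c4 then "DIA"
     else if c5 then "Broadband"
     else if c6 then "Wireless Cellular Internet"
     else ((PySem.Set.ofList ((l.filter (fun ct => ct ≠ "")).map PySem.Str.lower)).findSome?
         (fun s => (WINDSTREAM_CIRCUIT_TO_SERVICE.find? (fun p => PySem.Str.isIn p.1 s)).map Prod.snd)).getD "UCaaS")
      = windstream_service_type_py_alt l := by
  cases c0 with
  | true =>
    rw [if_pos rfl, pvAlt_case l 0 (by omega) (by omega) e0.symm]
    rfl
  | false =>
  rw [if_neg (by simp)]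
  have L1 : ∀ j, j < 1 → l.any (fun ct => pvP j (PySem.Str.lower ct)) = false := by
    intro j hj
    have h0 : j = 0 := by omega
    subst h0; exact e0.symm
  cases c1 with
  | true =>
    rw [if_pos rfl, pvAlt_case l 1 (by omega) L1 e1.symm]
    rfl
  | false =>
  rw [if_neg (by simp)]
  have L2 : ∀ j, j < 2 → l.any (fun ct => pvP j (PySem.Str.lower ct)) = false := by
    intro j hj
    rcases Nat.lt_or_ge j 1 with h | h
    · exact L1 j h
    · have hk : j = 1 := by omega
      subst hk; exact e1.symm
  cases c2 with
  | true =>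
    rw [if_pos rfl, pvAlt_case l 2 (by omega) L2 e2.symm]
    rfl
  | false =>
  rw [if_neg (by simp)]
  have L3 : ∀ j, j < 3 → l.any (fun ct => pvP j (PySem.Str.lower ct)) = false := by
    intro j hj
    rcases Nat.lt_or_ge j 2 with h | h
    · exact L2 j h
    · have hk : j = 2 := by omega
      subst hk; exact e2.symm
  cases c3 with
  | true =>
    rw [if_pos rfl, pvAlt_case l 3 (by omega) L3 e3.symm]
    rfl
  | false =>
  rw [if_neg (by simp)]
  have L4 : ∀ j, j < 4 → l.any (fun ct => pvP j (PySem.Str.lower ct)) = false := by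
    intro j hj
    rcases Nat.lt_or_ge j 3 with h | h
    · exact L3 j h
    · have hk : j = 3 := by omega
      subst hk; exact e3.symm
  cases c4 with
  | true =>
    rw [if_pos rfl, pvAlt_case l 4 (by omega) L4 e4.symm]
    rfl
  | false =>
  rw [if_neg (by simp)]
  have L5 : ∀ j, j < 5 → l.any (fun ct => pvP j (PySem.Str.lower ct)) = false := by
    intro j hj
    rcases Nat.lt_or_ge j 4 with h | h
    · exact L4 j h
    · have hk : j = 4 := by omega
      subst hk; exact e4.symm
  cases c5 with
  | true =>
    rw [if_pos rfl, pvAlt_case l 5 (by omega) L5 e5.symm]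
    rfl
  | false =>
  rw [if_neg (by simp)]
  have L6 : ∀ j, j < 6 → l.any (fun ct => pvP j (PySem.Str.lower ct)) = false := by
    intro j hj
    rcases Nat.lt_or_ge j 5 with h | h
    · exact L5 j h
    · have hk : j = 5 := by omega
      subst hk; exact e5.symm
  cases c6 with
  | true =>
    rw [if_pos rfl, pvAlt_case l 6 (by omega) L6 e6.symm]
    rfl
  | false =>
  rw [if_neg (by simp)]
  have L7 : ∀ j, j < 7 → l.any (fun ct => pvP j (PySem.Str.lower ct)) = false := by
    intro j hj
    rcases Nat.lt_or_ge j 6 with h | h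
    · exact L6 j h
    · have hk : j = 6 := by omega
      subst hk; exact e6.symm
  have hmem : ∀ s ∈ PySem.Set.ofList ((l.filter (fun ct => ct ≠ "")).map PySem.Str.lower),
      ∀ j, j ≤ 6 → pvP j s = false := by
    intro s hs j hj
    rcases (pvMem_setL l s).mp hs with ⟨ct, hct, _, rfl⟩
    have hany := L7 j (by omega)
    rw [List.any_eq_false] at hany
    simpa using hany ct hct
  rw [pvFallback _ hmem, pvAny_setL l (fun s => PySem.Str.isIn "email" s) (by decide)]
  simp only [← pvP7_eq]
  by_cases H7 : l.any (fun ct => pvP 7 (PySem.Str.lower ct)) = true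
  · rw [if_pos H7, pvAlt_case l 7 (by omega) L7 H7]
    rfl
  · rw [if_neg H7]
    have Hlow8 : ∀ j, j < 8 → l.any (fun ct => pvP j (PySem.Str.lower ct)) = false := by
      intro j hj
      rcases Nat.lt_or_ge j 7 with hj7 | hj7
      · exact L7 j hj7
      · have hj8 : j = 7 := by omega
        subst hj8; simpa using H7
    rw [pvAlt_none l Hlow8]
    rfl

-- ===== VERDICT (by name: the statement is the Claim_ definition above) =====
theorem windstream_service_type_py_spec : Claim_equal_windstream_service_type_py := by
  intro l _
  show windstream_service_type_py l = windstream_service_type_py_alt l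
  rw [windstream_service_type_py]
  rw [pvAny_setL l _ (by decide), pvAny_setL l _ (by decide), pvAny_setL l _ (by decide),
      pvAny_setL l _ (by decide), pvAny_setL l _ (by decide), pvAny_setL l _ (by decide),
      pvAny_setL l _ (by decide)]
  simp only [Bool.or_assoc]
  simp only [← pvP0_eq, ← pvP1_eq, ← pvP2_eq, ← pvP3_eq, ← pvP4_eq, ← pvP5_eq, ← pvP6_eq]
  exact pvChain_eq l _ _ _ _ _ _ _ rfl rfl rfl rfl rfl rfl rfl
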